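-- pv_equiv track=rewrite | github.com/danie1Lin/cracking-code-interview | ch05/p4_next_number.py | count_one_first
-- ===== SOURCE A (Python) =====
-- def count_one_first(n: int):
--     tmp, l0, l1 = n, 0, 0
--     while tmp > 0:
--         if tmp & 1:
--             l1 += 1
--         else:
--             break
--         tmp >>= 1
--     while tmp > 0:
--         if not tmp & 1:
--             l0 += 1
--         else:
--             break
--         tmp >>= 1
--     return l0, l1
-- ===== SOURCE B (Python) =====
-- def count_one_first(n: int):
--     if n <= 0:
--         return (0, 0)
--     s = bin(n)[2:][::-1]     # binary digits, least significant first
--     t = s.lstrip('1')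
--     u = t.lstrip('0')
--     return (len(t) - len(u), len(s) - len(t))
-- ===== Notes on version B (the rewrite author's own statement) =====
-- stated objective: idiomatic
-- what changed: Replaces the two bit-testing/shifting while-loops by building the binary string once with bin(n), reversing it, and reading the run lengths off with two lstrip calls and length differences.
import Mathlib
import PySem

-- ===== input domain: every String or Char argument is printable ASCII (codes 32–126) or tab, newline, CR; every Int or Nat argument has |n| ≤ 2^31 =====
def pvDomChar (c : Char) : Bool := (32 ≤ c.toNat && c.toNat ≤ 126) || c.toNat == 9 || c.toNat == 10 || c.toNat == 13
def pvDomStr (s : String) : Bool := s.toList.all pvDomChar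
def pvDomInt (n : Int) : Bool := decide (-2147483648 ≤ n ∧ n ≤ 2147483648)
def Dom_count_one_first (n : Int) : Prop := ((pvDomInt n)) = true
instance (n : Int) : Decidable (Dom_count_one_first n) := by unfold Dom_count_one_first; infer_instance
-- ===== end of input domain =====

-- B replaces A's two bit-testing loops by one binary string built with bin() and two lstrip calls (objective: idiomatic; same cost).

-- lemma needed by the ports' termination proofs
theorem pvFdiv2_toNat_lt (tmp : Int) (h : 0 < tmp) :
    (PySem.Int.floordiv tmp 2).toNat < tmp.toNat := by
  simp only [PySem.Int.floordiv]
  rw [Int.fdiv_eq_ediv]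
  omega

-- ===== PORT A =====
-- first while loop: counts trailing ones, breaks at a zero bit; returns (tmp, l1)
-- (`tmp & 1` ported as tmp % 2 — exact for Python ints; `tmp >>= 1` is floor division by 2)
def count_one_first_loop1 (tmp l1 : Int) : Int × Int :=
  if h : 0 < tmp then
    if PySem.Int.mod tmp 2 ≠ 0 then
      count_one_first_loop1 (PySem.Int.floordiv tmp 2) (l1 + 1)
    else (tmp, l1)
  else (tmp, l1)
termination_by tmp.toNat
decreasing_by exact pvFdiv2_toNat_lt tmp h

-- second while loop: counts the zeros that follow, breaks at a one bit
def count_one_first_loop2 (tmp l0 l1 : Int) : Int × Int :=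
  if h : 0 < tmp then
    if PySem.Int.mod tmp 2 = 0 then
      count_one_first_loop2 (PySem.Int.floordiv tmp 2) (l0 + 1) l1
    else (l0, l1)
  else (l0, l1)
termination_by tmp.toNat
decreasing_by exact pvFdiv2_toNat_lt tmp h

def count_one_first (n : Int) : Int × Int :=
  let p := count_one_first_loop1 n 0
  count_one_first_loop2 p.1 0 p.2

-- ===== PORT B =====
-- bin(m)[2:] for m > 0 : binary digits, most significant first (exact: CPython's bin without the '0b' prefix)
def pvBinMSB (m : Nat) : List Char :=
  if m = 0 then []
  else pvBinMSB (m / 2) ++ [if m % 2 = 1 then '1' else '0']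
termination_by m
decreasing_by omega

-- s.lstrip('1') / t.lstrip('0') are dropWhile of that single char (exact for a one-char argument);
-- [::-1] is List.reverse
def count_one_first_alt (n : Int) : Int × Int :=
  if n ≤ 0 then (0, 0)
  else
    let s := (pvBinMSB n.toNat).reverse
    let t := s.dropWhile (· == '1')
    let u := t.dropWhile (· == '0')
    ((t.length : Int) - u.length, (s.length : Int) - t.length)

-- ===== PRECONDITION & SPEC =====
def Spec_count_one_first (n : Int) (out : Int × Int) : Prop := out = count_one_first_alt n
instance (n : Int) (out : Int × Int) : Decidable (Spec_count_one_first n out) := by unfold Spec_count_one_first; infer_instance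

-- ===== CLAIM (what is proved, stated in full; the proofs are below) =====
def Claim_equal_count_one_first : Prop := ∀ (n : Int), Dom_count_one_first n → Spec_count_one_first n (count_one_first n)

-- ===== LEMMAS AND PROOFS =====

-- binary digits, least significant first (proof-side reference list)
def pvLsb (m : Nat) : List Char :=
  if m = 0 then []
  else (if m % 2 = 1 then '1' else '0') :: pvLsb (m / 2)
termination_by m
decreasing_by omega

theorem pvLsb_zero : pvLsb 0 = [] := by rw [pvLsb]; simp

theorem pvLsb_odd {m : Nat} (h : m % 2 = 1) : pvLsb m = '1' :: pvLsb (m / 2) := by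
  have h0 : m ≠ 0 := by omega
  rw [pvLsb]; simp [h0, h]

theorem pvLsb_even {m : Nat} (h0 : m ≠ 0) (h : m % 2 = 0) : pvLsb m = '0' :: pvLsb (m / 2) := by
  rw [pvLsb]; simp [h0, h]

theorem pvBinMSB_reverse (m : Nat) : (pvBinMSB m).reverse = pvLsb m := by
  induction m using Nat.strong_induction_on with
  | _ m ih =>
    rw [pvBinMSB, pvLsb]
    by_cases h : m = 0
    · simp [h]
    · simp only [h, if_false]
      rw [List.reverse_append, List.reverse_singleton]
      rw [ih (m / 2) (by omega)]
      simp

theorem pvMod_cast (m : Nat) : PySem.Int.mod (m : Int) 2 = ((m % 2 : Nat) : Int) := by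
  simp only [PySem.Int.mod]
  rw [Int.fmod_eq_emod]; omega

theorem pvFdiv_cast (m : Nat) : PySem.Int.floordiv (m : Int) 2 = ((m / 2 : Nat) : Int) := by
  simp only [PySem.Int.floordiv]
  rw [Int.fdiv_eq_ediv]; omega

theorem pvLoop2_spec (m : Nat) : ∀ l0 l1 : Int,
    count_one_first_loop2 (m : Int) l0 l1 =
      (l0 + ((pvLsb m).takeWhile (· == '0')).length, l1) := by
  induction m using Nat.strong_induction_on with
  | _ m ih =>
    intro l0 l1
    rw [count_one_first_loop2]
    by_cases h : m = 0
    · subst h; simp [pvLsb_zero]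
    · have hpos : (0 : Int) < (m : Int) := by omega
      rw [dif_pos hpos, pvMod_cast]
      by_cases he : m % 2 = 0
      · rw [if_pos (by rw [he]; rfl), pvFdiv_cast, ih (m / 2) (by omega), pvLsb_even h he]
        simp only [List.takeWhile_cons, Prod.mk.injEq]
        norm_num
        omega
      · have h1 : m % 2 = 1 := by omega
        rw [if_neg (by rw [h1]; decide), pvLsb_odd h1]
        simp

theorem pvLoop1_spec (m : Nat) : ∀ l1 : Int,
    ∃ r : Nat,
      count_one_first_loop1 (m : Int) l1 =
        ((r : Int), l1 + ((pvLsb m).takeWhile (· == '1')).length) ∧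
      pvLsb r = (pvLsb m).dropWhile (· == '1') := by
  induction m using Nat.strong_induction_on with
  | _ m ih =>
    intro l1
    rw [count_one_first_loop1]
    by_cases h : m = 0
    · subst h; exact ⟨0, by simp [pvLsb_zero]⟩
    · have hpos : (0 : Int) < (m : Int) := by omega
      rw [dif_pos hpos, pvMod_cast]
      by_cases h1 : m % 2 = 1
      · obtain ⟨r, hr, hlsb⟩ := ih (m / 2) (by omega) (l1 + 1)
        refine ⟨r, ?_, ?_⟩
        · rw [if_pos (by rw [h1]; decide), pvFdiv_cast, hr, pvLsb_odd h1]
          simp only [List.takeWhile_cons, Prod.mk.injEq]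
          norm_num
          omega
        · rw [pvLsb_odd h1]
          simpa using hlsb
      · have he : m % 2 = 0 := by omega
        refine ⟨m, ?_, ?_⟩
        · rw [if_neg (by rw [he]; decide), pvLsb_even h he]
          simp
        · rw [pvLsb_even h he]
          simp

theorem pvTakeDrop_len (p : Char → Bool) (s : List Char) :
    (s.takeWhile p).length + (s.dropWhile p).length = s.length := by
  have := congrArg List.length (List.takeWhile_append_dropWhile (p := p) (l := s))
  rw [List.length_append] at this
  exact this

-- ===== VERDICT (by name: the statement is the Claim_ definition above) =====
theorem count_one_first_spec : Claim_equal_count_one_first := by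
  intro n _
  unfold Spec_count_one_first count_one_first count_one_first_alt
  by_cases hn : n ≤ 0
  · have h1 : ¬ (0 : Int) < n := by omega
    rw [count_one_first_loop1, dif_neg h1]
    rw [count_one_first_loop2, dif_neg h1]
    simp [hn]
  · have hpos : 0 < n := by omega
    have hcast : ((n.toNat : Nat) : Int) = n := by omega
    simp only [hn, if_false]
    obtain ⟨r, hr, hlsb⟩ := pvLoop1_spec n.toNat 0
    rw [hcast] at hr
    rw [hr, pvLoop2_spec, pvBinMSB_reverse, hlsb]
    have ht := pvTakeDrop_len (· == '1') (pvLsb n.toNat)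
    have hu := pvTakeDrop_len (· == '0') ((pvLsb n.toNat).dropWhile (· == '1'))
    simp only [Prod.mk.injEq]
    constructor <;> omega
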